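-- pv_equiv track=rewrite | github.com/MarkSon-42/CodingTest_Python | venv/programmersBasicTraining/x 사이의 개수.py | solution
-- ===== SOURCE A (Python) =====
-- def solution(myString):
--     lengths = []
--     current_length = 0
--
--     for char in myString:
--         if char == "x":
--             lengths.append(current_length)
--             current_length = 0
--         else:
--             current_length += 1
--
--     lengths.append(current_length)
--
--     return lengths
-- ===== SOURCE B (Python) =====
-- def solution(myString):
--     return [len(segment) for segment in myString.split('x')]
-- ===== Notes on version B (the rewrite author's own statement) =====
-- stated objective: idiomatic
-- what changed: Replaces the character-by-character pass with a running counter reset on the separator by splitting the string on the separator and mapping len over the segments.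
import Mathlib
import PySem

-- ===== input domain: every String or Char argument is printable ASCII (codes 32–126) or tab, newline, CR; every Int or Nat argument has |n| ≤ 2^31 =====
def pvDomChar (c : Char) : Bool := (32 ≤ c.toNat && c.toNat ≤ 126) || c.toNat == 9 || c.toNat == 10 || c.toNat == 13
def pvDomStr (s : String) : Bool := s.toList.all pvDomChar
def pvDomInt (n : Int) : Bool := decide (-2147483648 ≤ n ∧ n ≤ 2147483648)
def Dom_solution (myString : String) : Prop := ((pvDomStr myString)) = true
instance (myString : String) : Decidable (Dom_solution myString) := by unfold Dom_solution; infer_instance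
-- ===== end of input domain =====

-- B splits on 'x' and maps len over the segments instead of A's counter pass; return values proved equal on all inputs.

-- ===== PORT A =====
-- one pass: append the running count on 'x', else increment; append the final count
def solution (myString : String) : List Int :=
  let st := myString.toList.foldl
    (fun (st : List Int × Int) c =>
      if c == 'x' then (st.1 ++ [st.2], 0) else (st.1, st.2 + 1))
    ([], 0)
  st.1 ++ [st.2]

-- ===== PORT B =====
-- [len(segment) for segment in myString.split('x')]; split? is some since "x" ≠ ""
def solution_alt (myString : String) : List Int :=
  ((PySem.Str.split? myString "x").getD []).map (fun segment => PySem.Str.len segment)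

-- ===== PRECONDITION & SPEC =====
def Spec_solution (myString : String) (out : List Int) : Prop := out = solution_alt myString
instance (myString : String) (out : List Int) : Decidable (Spec_solution myString out) := by unfold Spec_solution; infer_instance

-- ===== CLAIM (what is proved, stated in full; the proofs are below) =====
def Claim_equal_solution : Prop := ∀ (myString : String), Dom_solution myString → Spec_solution myString (solution myString)

-- ===== LEMMAS AND PROOFS =====

-- the ideal segment-length list: counts chars until each 'x', resetting
def segLens : List Char → Int → List Int
  | [], cur => [cur]
  | c :: cs, cur => if c == 'x' then cur :: segLens cs 0 else segLens cs (cur + 1)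

theorem foldl_segLens : ∀ (cs : List Char) (lens : List Int) (cur : Int),
    (cs.foldl (fun (st : List Int × Int) c =>
        if c == 'x' then (st.1 ++ [st.2], 0) else (st.1, st.2 + 1)) (lens, cur)).1
      ++ [(cs.foldl (fun (st : List Int × Int) c =>
        if c == 'x' then (st.1 ++ [st.2], 0) else (st.1, st.2 + 1)) (lens, cur)).2]
      = lens ++ segLens cs cur := by
  intro cs
  induction cs with
  | nil => intro lens cur; simp [segLens]
  | cons c cs ih =>
    intro lens cur
    simp only [List.foldl_cons]
    by_cases h : c = 'x'
    · simp only [h, beq_self_eq_true, if_pos, ih]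
      simp [segLens]
    · have hb : (c == 'x') = false := by simp [h]
      simp only [hb, Bool.false_eq_true, if_false, ih]
      simp [segLens, hb]

theorem go_segLens : ∀ (fuel : Nat) (l cur : List Char) (acc : List (List Char)),
    l.length < fuel →
    (PySem.Chars.splitOn.go ['x'] fuel l cur acc).map (fun s => (s.length : Int))
      = acc.reverse.map (fun s => (s.length : Int)) ++ segLens l (cur.length : Int) := by
  intro fuel
  induction fuel with
  | zero => intro l cur acc h; omega
  | succ f ih =>
    intro l cur acc h
    cases l with
    | nil => simp [PySem.Chars.splitOn.go, segLens]
    | cons c rest =>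
      rw [PySem.Chars.splitOn.go]
      by_cases hc : c = 'x'
      · subst hc
        have hp : List.isPrefixOf ['x'] ('x' :: rest) = true := by simp [List.isPrefixOf]
        simp only [hp, if_pos]
        rw [ih _ _ _ (by simp at h ⊢; omega)]
        simp [segLens]
      · have hp : List.isPrefixOf ['x'] (c :: rest) = false := by
          simp [List.isPrefixOf]; exact fun e => hc e.symm
        simp only [hp, Bool.false_eq_true, if_false]
        rw [ih _ _ _ (by simp at h ⊢; omega)]
        simp [segLens, hc]

theorem splitOn_segLens (cs : List Char) :
    (PySem.Chars.splitOn cs ['x']).map (fun s => (s.length : Int)) = segLens cs 0 := by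
  unfold PySem.Chars.splitOn
  rw [go_segLens (cs.length + 1) cs [] [] (by omega)]
  simp

-- ===== VERDICT (by name: the statement is the Claim_ definition above) =====
theorem solution_spec : Claim_equal_solution := by
  intro s _
  unfold Spec_solution solution solution_alt
  rw [foldl_segLens]
  simp only [PySem.Str.split?, PySem.Chars.split?, show "x".toList = ['x'] from rfl,
    List.isEmpty_cons, Bool.false_eq_true, if_false, Option.map_some, Option.getD_some,
    List.map_map]
  rw [← splitOn_segLens s.toList]
  apply List.map_congr_left
  intro l _
  simp [PySem.Str.len_eq, Function.comp]
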